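-- pv_equiv track=rewrite | github.com/VenkataExasol/mes-ai-analytics | hackathon-proj/dashboard/streamlit_app.py | _build_column_mapping
-- ===== SOURCE A (Python) =====
-- COLUMN_CANDIDATES = {
--     "plant_id": ["plant_id"],
--     "plant_name": ["plant_name"],
--     "country": ["country"],
--     "date": ["date"],
--     "shift": ["shift"],
--     "planned_time_min": ["planned_time_min"],
--     "run_time_min": ["run_time_min"],
--     "downtime_min": ["downtime_min"],
--     "total_units": ["total_units"],
--     "good_units": ["good_units"],
--     "defective_units": ["defective_units", "rejected_units"],
--     "availability": ["availability"],
--     "performance": ["performance"],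
--     "quality": ["quality"],
--     "oee_reported": ["oee_reported", "oee"],
--     "oee_normalized": ["oee_normalized"],
--     "data_source_type": ["data_source_type"],
-- }
--
-- def _build_column_mapping(available_columns: list[str]) -> dict[str, str]:
--     lower_map = {col.lower(): col for col in available_columns}
--     mapping: dict[str, str] = {}
--
--     for canonical, candidates in COLUMN_CANDIDATES.items():
--         for candidate in candidates:
--             if candidate.lower() in lower_map:
--                 mapping[canonical] = lower_map[candidate.lower()]
--                 break
--
--     return mapping
-- ===== SOURCE B (Python) =====
-- COLUMN_CANDIDATES = {
--     "plant_id": ["plant_id"],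
--     "plant_name": ["plant_name"],
--     "country": ["country"],
--     "date": ["date"],
--     "shift": ["shift"],
--     "planned_time_min": ["planned_time_min"],
--     "run_time_min": ["run_time_min"],
--     "downtime_min": ["downtime_min"],
--     "total_units": ["total_units"],
--     "good_units": ["good_units"],
--     "defective_units": ["defective_units", "rejected_units"],
--     "availability": ["availability"],
--     "performance": ["performance"],
--     "quality": ["quality"],
--     "oee_reported": ["oee_reported", "oee"],
--     "oee_normalized": ["oee_normalized"],
--     "data_source_type": ["data_source_type"],
-- }
--
--
-- def _build_column_mapping(available_columns):
--     # Inverted strategy: build a reverse index alias -> (canonical, priority) once,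
--     # then make ONE pass over available_columns, keeping per canonical the
--     # best-priority column (ties: the later column wins), and emit in canonical order.
--     alias_index = {}
--     for canonical, candidates in COLUMN_CANDIDATES.items():
--         for prio, candidate in enumerate(candidates):
--             alias_index[candidate.lower()] = (canonical, prio)
--
--     best = {}
--     for col in available_columns:
--         hit = alias_index.get(col.lower())
--         if hit is not None:
--             canonical, prio = hit
--             cur = best.get(canonical)
--             if cur is None or prio <= cur[0]:
--                 best[canonical] = (prio, col)
--
--     mapping = {}
--     for canonical in COLUMN_CANDIDATES:
--         found = best.get(canonical)
--         if found is not None: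
--             mapping[canonical] = found[1]
--     return mapping
-- ===== Notes on version B (the rewrite author's own statement) =====
-- stated objective: alternative
-- what changed: Inverted the traversal: instead of scanning per canonical name through its candidates, B builds a reverse index alias->(canonical,priority) once and makes a single pass over available_columns, keeping per canonical the best-priority column (ties: later column wins), then emits in canonical order.
import Mathlib
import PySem

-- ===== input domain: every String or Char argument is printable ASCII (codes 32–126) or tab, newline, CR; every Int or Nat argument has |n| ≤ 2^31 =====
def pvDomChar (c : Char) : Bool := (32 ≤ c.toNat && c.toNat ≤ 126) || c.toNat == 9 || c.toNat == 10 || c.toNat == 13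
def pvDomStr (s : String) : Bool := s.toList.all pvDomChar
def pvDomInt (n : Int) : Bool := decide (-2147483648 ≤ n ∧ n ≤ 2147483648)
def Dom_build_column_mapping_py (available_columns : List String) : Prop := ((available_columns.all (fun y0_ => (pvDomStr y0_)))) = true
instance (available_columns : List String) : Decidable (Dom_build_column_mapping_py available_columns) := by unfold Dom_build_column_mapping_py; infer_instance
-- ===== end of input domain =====

-- B inverts the traversal: a reverse alias->(canonical,priority) index plus ONE pass over
-- the columns replaces A's per-canonical candidate search (alternative, same result).

-- COLUMN_CANDIDATES, shared module constant (insertion order of the Python dict)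
def pvCandidates : List (String × List String) :=
  [("plant_id", ["plant_id"]),
   ("plant_name", ["plant_name"]),
   ("country", ["country"]),
   ("date", ["date"]),
   ("shift", ["shift"]),
   ("planned_time_min", ["planned_time_min"]),
   ("run_time_min", ["run_time_min"]),
   ("downtime_min", ["downtime_min"]),
   ("total_units", ["total_units"]),
   ("good_units", ["good_units"]),
   ("defective_units", ["defective_units", "rejected_units"]),
   ("availability", ["availability"]),
   ("performance", ["performance"]),
   ("quality", ["quality"]),
   ("oee_reported", ["oee_reported", "oee"]),
   ("oee_normalized", ["oee_normalized"]),
   ("data_source_type", ["data_source_type"])]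

-- ===== PORT A =====
-- inner 'for candidate in candidates' loop with break; the lookup
-- lower_map[candidate.lower()] is guarded by the 'in' test, so getD's default is never used
def pvInnerA (lower_map : PySem.Dict String String) (canonical : String)
    (mapping : PySem.Dict String String) : List String → PySem.Dict String String
  | [] => mapping
  | c :: cs =>
    if lower_map.contains (PySem.Str.lower c) then
      mapping.insert canonical (lower_map.getD (PySem.Str.lower c) "")
    else pvInnerA lower_map canonical mapping cs

def build_column_mapping_py (available_columns : List String) : List (String × String) :=
  let lower_map := available_columns.foldl
    (fun d col => d.insert (PySem.Str.lower col) col) PySem.Dict.empty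
  (pvCandidates.foldl (fun m p => pvInnerA lower_map p.1 m p.2) PySem.Dict.empty).items

-- ===== PORT B =====
-- alias_index[candidate.lower()] = (canonical, prio), built over COLUMN_CANDIDATES once
def pvAliasIndex : PySem.Dict String (String × Int) :=
  pvCandidates.foldl
    (fun d p => (PySem.List.enumerate p.2).foldl
      (fun d ip => d.insert (PySem.Str.lower ip.2) (p.1, ip.1)) d)
    PySem.Dict.empty

-- body of 'for col in available_columns: …'
def pvBestStep (best : PySem.Dict String (Int × String)) (col : String) :
    PySem.Dict String (Int × String) :=
  match pvAliasIndex.get? (PySem.Str.lower col) with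
  | none => best
  | some hit =>
    match best.get? hit.1 with
    | none => best.insert hit.1 (hit.2, col)
    | some cur => if hit.2 ≤ cur.1 then best.insert hit.1 (hit.2, col) else best

def build_column_mapping_py_alt (available_columns : List String) : List (String × String) :=
  let best := available_columns.foldl pvBestStep PySem.Dict.empty
  (pvCandidates.foldl
    (fun m p =>
      match best.get? p.1 with
      | some found => m.insert p.1 found.2
      | none => m)
    PySem.Dict.empty).items

-- ===== PRECONDITION & SPEC =====
def Spec_build_column_mapping_py (available_columns : List String) (out : List (String × String)) : Prop := out = build_column_mapping_py_alt available_columns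
instance (available_columns : List String) (out : List (String × String)) : Decidable (Spec_build_column_mapping_py available_columns out) := by unfold Spec_build_column_mapping_py; infer_instance

-- ===== CLAIM (what is proved, stated in full; the proofs are below) =====
def Claim_equal_build_column_mapping_py : Prop := ∀ (available_columns : List String), Dom_build_column_mapping_py available_columns → Spec_build_column_mapping_py available_columns (build_column_mapping_py available_columns)

-- ===== LEMMAS AND PROOFS =====

-- the 19 alias strings, i.e. the keys of pvAliasIndex
def pvAliases : List String :=
  ["plant_id", "plant_name", "country", "date", "shift", "planned_time_min",
   "run_time_min", "downtime_min", "total_units", "good_units", "defective_units",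
   "rejected_units", "availability", "performance", "quality", "oee_reported",
   "oee", "oee_normalized", "data_source_type"]

-- literal form of the alias index (speeds up the per-canonical decide steps)
def pvAliasLit : PySem.Dict String (String × Int) := PySem.Dict.mk
  [("plant_id", ("plant_id", 0)), ("plant_name", ("plant_name", 0)), ("country", ("country", 0)),
   ("date", ("date", 0)), ("shift", ("shift", 0)), ("planned_time_min", ("planned_time_min", 0)),
   ("run_time_min", ("run_time_min", 0)), ("downtime_min", ("downtime_min", 0)),
   ("total_units", ("total_units", 0)), ("good_units", ("good_units", 0)),
   ("defective_units", ("defective_units", 0)), ("rejected_units", ("defective_units", 1)),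
   ("availability", ("availability", 0)), ("performance", ("performance", 0)),
   ("quality", ("quality", 0)), ("oee_reported", ("oee_reported", 0)), ("oee", ("oee_reported", 1)),
   ("oee_normalized", ("oee_normalized", 0)), ("data_source_type", ("data_source_type", 0))]

lemma aliasIndex_lit : pvAliasIndex = pvAliasLit := by decide

-- generalized last-match accumulator: found = last col in cols with col.lower() == target
def pvLM (target : String) (found : Option String) (cols : List String) : Option String :=
  cols.foldl (fun found col => if PySem.Str.lower col == target then some col else found) found

-- A's inner candidate loop, re-expressed through last-match scans (proof-side helper)
def pvInnerSel (cols : List String) (canonical : String)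
    (mapping : PySem.Dict String String) : List String → PySem.Dict String String
  | [] => mapping
  | c :: cs =>
    match pvLM (PySem.Str.lower c) none cols with
    | some v => mapping.insert canonical v
    | none => pvInnerSel cols canonical mapping cs

-- lookup in the {col.lower(): col} dict is the last-match scan
lemma get?_lowerFold (cols : List String) (d : PySem.Dict String String) (k : String) :
    (cols.foldl (fun d col => d.insert (PySem.Str.lower col) col) d).get? k
      = cols.foldl (fun found col => if PySem.Str.lower col == k then some col else found)
          (d.get? k) := by
  induction cols generalizing d with
  | nil => rfl
  | cons c cs ih =>
      simp only [List.foldl_cons, ih]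
      congr 1
      rw [PySem.Dict.get?_insert]
      by_cases h : PySem.Str.lower c = k
      · simp [h]
      · simp [h, Ne.symm h]

lemma lastMatch_eq_get? (cols : List String) (k : String) :
    pvLM k none cols
      = (cols.foldl (fun d col => d.insert (PySem.Str.lower col) col)
          (PySem.Dict.empty : PySem.Dict String String)).get? k := by
  rw [get?_lowerFold, PySem.Dict.get?_empty, pvLM]

lemma innerA_eq_innerSel (cols : List String) (canonical : String)
    (mapping : PySem.Dict String String) (cands : List String) :
    pvInnerA (cols.foldl (fun d col => d.insert (PySem.Str.lower col) col) PySem.Dict.empty)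
        canonical mapping cands
      = pvInnerSel cols canonical mapping cands := by
  induction cands generalizing mapping with
  | nil => rfl
  | cons c cs ih =>
      rw [pvInnerA, pvInnerSel, PySem.Dict.contains_eq_isSome_get?, ← lastMatch_eq_get?]
      rcases hm : pvLM (PySem.Str.lower c) none cols with _ | v
      · simpa [hm] using ih mapping
      · simp only [Option.isSome_some, if_true]
        rw [PySem.Dict.getD_eq_get?_getD, ← lastMatch_eq_get?, hm]
        rfl

-- B-side: per-canonical projection of the best-dict fold
def pvUpd (st : Option (Int × String)) (p : Int) (col : String) : Option (Int × String) :=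
  match st with
  | none => some (p, col)
  | some cur => if p ≤ cur.1 then some (p, col) else some cur

def pvStepKey (c0 : String) (st : Option (Int × String)) (col : String) : Option (Int × String) :=
  match pvAliasIndex.get? (PySem.Str.lower col) with
  | none => st
  | some hit => if hit.1 = c0 then pvUpd st hit.2 col else st

lemma bestFold_get? (cols : List String) (best : PySem.Dict String (Int × String)) (c0 : String) :
    (cols.foldl pvBestStep best).get? c0 = cols.foldl (pvStepKey c0) (best.get? c0) := by
  induction cols generalizing best with
  | nil => rfl
  | cons c cs ih =>
      rw [List.foldl_cons, List.foldl_cons, ih]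
      congr 1
      unfold pvBestStep pvStepKey
      rcases hg : pvAliasIndex.get? (PySem.Str.lower c) with _ | hit
      · rfl
      · dsimp only
        by_cases hc : hit.1 = c0
        · subst hc
          rcases hb : best.get? hit.1 with _ | cur
          · simp [PySem.Dict.get?_insert_self, pvUpd]
          · by_cases hle : hit.2 ≤ cur.1
            · simp [hle, PySem.Dict.get?_insert_self, pvUpd]
            · simp [hle, pvUpd, hb]
        · rcases hb : best.get? hit.1 with _ | cur
          · simp [hc, PySem.Dict.get?_insert, Ne.symm hc]
          · by_cases hle : hit.2 ≤ cur.1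
            · simp [hc, hle, PySem.Dict.get?_insert, Ne.symm hc]
            · simp [hc, hle]

lemma aliasIndex_miss (s : String) (hs : s ∉ pvAliases) : pvAliasIndex.get? s = none := by
  rw [PySem.Dict.get?_eq_none_iff_not_mem_keys,
      show pvAliasIndex.keys = pvAliases from by rw [aliasIndex_lit]; decide]
  exact hs

-- per-canonical step functions on the candidate-list side
def pvStep1 (a : String) (st : Option (Int × String)) (col : String) : Option (Int × String) :=
  if PySem.Str.lower col == a then pvUpd st 0 col else st

def pvStep2 (a b : String) (st : Option (Int × String)) (col : String) : Option (Int × String) :=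
  if PySem.Str.lower col == a then pvUpd st 0 col
  else if PySem.Str.lower col == b then pvUpd st 1 col else st

lemma stepKey_eq1 (c0 a : String) (hA : a ∈ pvAliases)
    (h0 : pvAliasIndex.get? a = some (c0, 0))
    (hu : (pvAliases.all (fun s => s == a
      || ((pvAliasIndex.get? s).elim true (fun hit => hit.1 != c0)))) = true) :
    ∀ st col, pvStepKey c0 st col = pvStep1 a st col := by
  intro st col
  unfold pvStepKey pvStep1
  by_cases hm : PySem.Str.lower col ∈ pvAliases
  · by_cases he : PySem.Str.lower col = a
    · rw [he, h0]; simp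
    · rcases hg : pvAliasIndex.get? (PySem.Str.lower col) with _ | hit
      · simp [he]
      · have hh := List.all_eq_true.mp hu _ hm
        rw [hg] at hh
        simp only [Option.elim_some, Bool.or_eq_true, beq_iff_eq, bne_iff_ne, ne_eq] at hh
        rcases hh with hh | hh
        · exact absurd hh he
        · dsimp only
          simp [hh, he]
  · have he : PySem.Str.lower col ≠ a := fun e => hm (e ▸ hA)
    rw [aliasIndex_miss _ hm]
    simp [he]

lemma stepKey_eq2 (c0 a b : String) (hA : a ∈ pvAliases) (hB : b ∈ pvAliases)
    (h0 : pvAliasIndex.get? a = some (c0, 0))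
    (h1 : pvAliasIndex.get? b = some (c0, 1))
    (hu : (pvAliases.all (fun s => s == a || s == b
      || ((pvAliasIndex.get? s).elim true (fun hit => hit.1 != c0)))) = true) :
    ∀ st col, pvStepKey c0 st col = pvStep2 a b st col := by
  intro st col
  unfold pvStepKey pvStep2
  by_cases hm : PySem.Str.lower col ∈ pvAliases
  · by_cases hea : PySem.Str.lower col = a
    · rw [hea, h0]; simp
    · by_cases heb : PySem.Str.lower col = b
      · rw [heb, h1]; simp [heb ▸ hea]
      · rcases hg : pvAliasIndex.get? (PySem.Str.lower col) with _ | hit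
        · simp [hea, heb]
        · have hh := List.all_eq_true.mp hu _ hm
          rw [hg] at hh
          simp only [Option.elim_some, Bool.or_eq_true, beq_iff_eq, bne_iff_ne, ne_eq] at hh
          rcases hh with (hh | hh) | hh
          · exact absurd hh hea
          · exact absurd hh heb
          · dsimp only
            simp [hh, hea, heb]
  · have hea : PySem.Str.lower col ≠ a := fun e => hm (e ▸ hA)
    have heb : PySem.Str.lower col ≠ b := fun e => hm (e ▸ hB)
    rw [aliasIndex_miss _ hm]
    simp [hea, heb]

-- the single-candidate fold is the last-match scan
lemma core1 (a : String) (cols : List String) (fa : Option String) :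
    cols.foldl (pvStep1 a) (fa.map (fun v => ((0 : Int), v)))
      = (pvLM a fa cols).map (fun v => ((0 : Int), v)) := by
  induction cols generalizing fa with
  | nil => rfl
  | cons c cs ih =>
      rw [pvLM, List.foldl_cons, List.foldl_cons]
      by_cases h : PySem.Str.lower c == a
      · have hstep : pvStep1 a (fa.map (fun v => ((0 : Int), v))) c = some (0, c) := by
          cases fa <;> simp [pvStep1, h, pvUpd]
        rw [hstep, h]
        exact ih (some c)
      · have hstep : pvStep1 a (fa.map (fun v => ((0 : Int), v))) c
            = fa.map (fun v => ((0 : Int), v)) := by simp [pvStep1, h]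
        rw [hstep]
        simp only [Bool.not_eq_true] at h
        rw [h]
        exact ih fa

-- the two-candidate fold combines the two last-match scans, first candidate preferred
def pvComb2 (fa fb : Option String) : Option (Int × String) :=
  match fa with
  | some v => some (0, v)
  | none => fb.map (fun v => ((1 : Int), v))

lemma core2 (a b : String) (hab : a ≠ b) (cols : List String) (fa fb : Option String) :
    cols.foldl (pvStep2 a b) (pvComb2 fa fb)
      = pvComb2 (pvLM a fa cols) (pvLM b fb cols) := by
  induction cols generalizing fa fb with
  | nil => rfl
  | cons c cs ih =>
      rw [pvLM, pvLM, List.foldl_cons, List.foldl_cons, List.foldl_cons]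
      by_cases ha : PySem.Str.lower c == a
      · have hb : (PySem.Str.lower c == b) = false := by
          simp only [beq_iff_eq] at ha ⊢; simp [ha, hab]
        have hstep : pvStep2 a b (pvComb2 fa fb) c = pvComb2 (some c) fb := by
          cases fa <;> cases fb <;> simp [pvStep2, ha, pvUpd, pvComb2]
        rw [hstep, ha, hb]
        exact ih (some c) fb
      · by_cases hb : PySem.Str.lower c == b
        · have hstep : pvStep2 a b (pvComb2 fa fb) c = pvComb2 fa (some c) := by
            cases fa <;> cases fb <;> simp [pvStep2, ha, hb, pvUpd, pvComb2]
          rw [hstep, hb]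
          simp only [Bool.not_eq_true] at ha
          rw [ha]
          exact ih fa (some c)
        · have hstep : pvStep2 a b (pvComb2 fa fb) c = pvComb2 fa fb := by
            simp [pvStep2, ha, hb]
          rw [hstep]
          simp only [Bool.not_eq_true] at ha hb
          rw [ha, hb]
          exact ih fa fb

-- per-canonical agreement, single-candidate shape
lemma agree1 (cols : List String) (m : PySem.Dict String String) (c0 a : String)
    (hA : a ∈ pvAliases) (h0 : pvAliasIndex.get? a = some (c0, 0))
    (hu : (pvAliases.all (fun s => s == a
      || ((pvAliasIndex.get? s).elim true (fun hit => hit.1 != c0)))) = true)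
    (hla : PySem.Str.lower a = a) :
    pvInnerSel cols c0 m [a]
      = (match (cols.foldl pvBestStep PySem.Dict.empty).get? c0 with
         | some found => m.insert c0 found.2
         | none => m) := by
  rw [bestFold_get?, PySem.Dict.get?_empty,
      PySem.List.foldl_congr_mem cols _ _ none (fun st c _ => stepKey_eq1 c0 a hA h0 hu st c),
      show (none : Option (Int × String)) = Option.map (fun v => ((0 : Int), v)) none from rfl,
      core1]
  rcases h1 : pvLM a none cols with _ | v <;> simp [pvInnerSel, hla, h1]

-- per-canonical agreement, two-candidate shape
lemma agree2 (cols : List String) (m : PySem.Dict String String) (c0 a b : String)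
    (hA : a ∈ pvAliases) (hB : b ∈ pvAliases) (hab : a ≠ b)
    (h0 : pvAliasIndex.get? a = some (c0, 0))
    (h1 : pvAliasIndex.get? b = some (c0, 1))
    (hu : (pvAliases.all (fun s => s == a || s == b
      || ((pvAliasIndex.get? s).elim true (fun hit => hit.1 != c0)))) = true)
    (hla : PySem.Str.lower a = a) (hlb : PySem.Str.lower b = b) :
    pvInnerSel cols c0 m [a, b]
      = (match (cols.foldl pvBestStep PySem.Dict.empty).get? c0 with
         | some found => m.insert c0 found.2
         | none => m) := by
  rw [bestFold_get?, PySem.Dict.get?_empty,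
      PySem.List.foldl_congr_mem cols _ _ none (fun st c _ => stepKey_eq2 c0 a b hA hB h0 h1 hu st c),
      show (none : Option (Int × String)) = pvComb2 none none from rfl,
      core2 a b hab]
  rcases ha : pvLM a none cols with _ | v <;>
    rcases hb : pvLM b none cols with _ | w <;>
      simp [pvInnerSel, hla, hlb, ha, hb, pvComb2]


lemma step_agree (cols : List String) :
    ∀ (m : PySem.Dict String String), ∀ p ∈ pvCandidates,
      pvInnerSel cols p.1 m p.2
        = (match (cols.foldl pvBestStep PySem.Dict.empty).get? p.1 with
           | some found => m.insert p.1 found.2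
           | none => m) := by
  intro m p hp
  simp only [pvCandidates, List.mem_cons, List.not_mem_nil, or_false] at hp
  rcases hp with rfl | rfl | rfl | rfl | rfl | rfl | rfl | rfl | rfl | rfl | rfl | rfl | rfl | rfl | rfl | rfl | rfl <;>
    first
      | exact agree1 cols m _ _ (by decide) (by rw [aliasIndex_lit]; decide)
          (by rw [aliasIndex_lit]; decide) (by decide)
      | exact agree2 cols m _ _ _ (by decide) (by decide) (by decide)
          (by rw [aliasIndex_lit]; decide) (by rw [aliasIndex_lit]; decide)
          (by rw [aliasIndex_lit]; decide) (by decide) (by decide)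

-- ===== VERDICT (by name: the statement is the Claim_ definition above) =====
theorem build_column_mapping_py_spec : Claim_equal_build_column_mapping_py := by
  intro cols _
  unfold Spec_build_column_mapping_py build_column_mapping_py build_column_mapping_py_alt
  dsimp only
  congr 1
  rw [PySem.List.foldl_congr_mem pvCandidates _ _ PySem.Dict.empty
        (fun m p _ => innerA_eq_innerSel cols p.1 m p.2)]
  exact PySem.List.foldl_congr_mem pvCandidates _ _ PySem.Dict.empty (step_agree cols)
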